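-- pv_equiv track=rewrite | github.com/Svjatoslav-so/BoatFinderBot | parser/NewParser.py | get_length_beam
-- ===== SOURCE A (Python) =====
-- from typing import Any, Optional
--
-- def get_length_beam(length_beam: str) -> Optional[tuple[str, str]]:
--     length = beam = None
--     if not (length_beam is None):
--         length = beam = ""
--         is_length = True
--         for s in length_beam:
--             if s.isdigit() or s == ".":
--                 if is_length:
--                     length += s
--                 else:
--                     beam += s
--             elif s == "x":
--                 is_length = False
--     return length, beam
-- ===== SOURCE B (Python) =====
-- def get_length_beam(length_beam):
--     if length_beam is None:
--         return None, None
--     head, _, tail = length_beam.partition("x")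
--     keep = lambda part: "".join(c for c in part if c.isdigit() or c == ".")
--     return keep(head), keep(tail)
-- ===== Notes on version B (the rewrite author's own statement) =====
-- stated objective: simpler
-- what changed: Replaces A's single flag-toggling pass that routes each character into one of two accumulators by a split at the first 'x' (str.partition) followed by two independent filter passes.
import Mathlib
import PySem

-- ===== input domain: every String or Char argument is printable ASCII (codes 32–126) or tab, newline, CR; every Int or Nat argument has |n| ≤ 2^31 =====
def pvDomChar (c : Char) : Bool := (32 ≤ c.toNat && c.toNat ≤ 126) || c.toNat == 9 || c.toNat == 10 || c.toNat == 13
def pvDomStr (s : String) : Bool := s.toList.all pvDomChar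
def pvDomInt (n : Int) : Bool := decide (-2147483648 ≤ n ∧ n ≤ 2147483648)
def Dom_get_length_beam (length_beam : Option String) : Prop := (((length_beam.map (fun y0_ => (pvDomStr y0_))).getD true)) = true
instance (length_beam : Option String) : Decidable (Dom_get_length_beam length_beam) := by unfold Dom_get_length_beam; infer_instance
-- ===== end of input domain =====

-- B replaces A's one flag-driven pass by split-at-first-'x' then two independent filters (objective: simpler).

-- ===== PORT A =====
-- state = (length, beam, is_length); string concatenation transliterated as list-of-chars append, String.ofList at return
def pvStepA (st : List Char × List Char × Bool) (c : Char) : List Char × List Char × Bool :=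
  if PySem.Chars.isdigit c || c = '.' then
    if st.2.2 then (st.1 ++ [c], st.2.1, st.2.2)
    else (st.1, st.2.1 ++ [c], st.2.2)
  else if c = 'x' then (st.1, st.2.1, false)
  else st

def get_length_beam (length_beam : Option String) : Option String × Option String :=
  match length_beam with
  | none => (none, none)
  | some s =>
    let st := s.toList.foldl pvStepA ([], [], true)
    (some (String.ofList st.1), some (String.ofList st.2.1))

-- ===== PORT B =====
-- keep only digits and '.'  (the per-character filter of Source B)
def pvKeep (cs : List Char) : List Char :=
  cs.filter (fun c => PySem.Chars.isdigit c || c = '.')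

def get_length_beam_alt (length_beam : Option String) : Option String × Option String :=
  match length_beam with
  | none => (none, none)
  | some s =>
    -- partition at the first 'x' (head, tail), exact for str.partition
    let cs := s.toList
    let head := cs.takeWhile (fun c => c ≠ 'x')
    let tail := (cs.dropWhile (fun c => c ≠ 'x')).drop 1
    (some (String.ofList (pvKeep head)), some (String.ofList (pvKeep tail)))

-- ===== PRECONDITION & SPEC =====
def Spec_get_length_beam (length_beam : Option String) (out : Option String × Option String) : Prop := out = get_length_beam_alt length_beam
instance (length_beam : Option String) (out : Option String × Option String) : Decidable (Spec_get_length_beam length_beam out) := by unfold Spec_get_length_beam; infer_instance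

-- ===== CLAIM (what is proved, stated in full; the proofs are below) =====
def Claim_equal_get_length_beam : Prop := ∀ (length_beam : Option String), Dom_get_length_beam length_beam → Spec_get_length_beam length_beam (get_length_beam length_beam)

-- ===== LEMMAS AND PROOFS =====

theorem pvFoldA_false (cs : List Char) (l b : List Char) :
    cs.foldl pvStepA (l, b, false) = (l, b ++ pvKeep cs, false) := by
  induction cs generalizing b with
  | nil => simp [pvKeep]
  | cons c rest ih =>
    by_cases hk : (PySem.Chars.isdigit c || c = '.') = true
    · simp [List.foldl, pvStepA, hk, ih, pvKeep]
    · have hd : PySem.Chars.isdigit 'x' = false := by decide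
      by_cases hx : c = 'x' <;> simp [List.foldl, pvStepA, hk, hx, hd, ih, pvKeep]

theorem pvFoldA_true (cs : List Char) (l b : List Char) :
    (cs.foldl pvStepA (l, b, true)).1 = l ++ pvKeep (cs.takeWhile (fun c => c ≠ 'x')) ∧
    (cs.foldl pvStepA (l, b, true)).2.1 = b ++ pvKeep ((cs.dropWhile (fun c => c ≠ 'x')).drop 1) := by
  induction cs generalizing l b with
  | nil => simp [pvKeep]
  | cons c rest ih =>
    by_cases hx : c = 'x'
    · subst hx
      have hd : PySem.Chars.isdigit 'x' = false := by decide
      simp [List.foldl, pvStepA, hd, pvFoldA_false, pvKeep]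
    · by_cases hk : (PySem.Chars.isdigit c || c = '.') = true
      · simp [List.foldl, pvStepA, hk, hx, ih, pvKeep]
      · simp [List.foldl, pvStepA, hk, hx, ih, pvKeep]

-- ===== VERDICT (by name: the statement is the Claim_ definition above) =====
theorem get_length_beam_spec : Claim_equal_get_length_beam := by
  intro lb _
  unfold Spec_get_length_beam
  cases lb with
  | none => rfl
  | some s =>
    simp only [get_length_beam, get_length_beam_alt]
    have h := pvFoldA_true s.toList [] []
    simp only [List.nil_append] at h
    rw [h.1, h.2]
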